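-- pv_equiv track=rewrite | github.com/Spookiel/CompetitiveProgramming | NWERC/2015/IdentifyingMapTiles.py | solve
-- ===== SOURCE A (Python) =====
-- def solve(x, y, s):
--     if len(s) == 0:
--         return x, y
--
--     if s[0] == "0":
--         return solve(x, y, s[1:])
--     elif s[0] == "1":
--         return solve(x + pow(2, len(s) - 1), y, s[1:])
--     elif s[0] == "2":
--         return solve(x, y + pow(2, len(s) - 1), s[1:])
--     else:
--         return solve(x + pow(2, len(s) - 1), y + pow(2, len(s) - 1), s[1:])
-- ===== SOURCE B (Python) =====
-- def solve(x, y, s):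
--     dx = dy = 0
--     for c in s:
--         dx *= 2
--         dy *= 2
--         if c == "1":
--             dx += 1
--         elif c == "2":
--             dy += 1
--         elif c != "0":
--             dx += 1
--             dy += 1
--     return x + dx, y + dy
-- ===== Notes on version B (the rewrite author's own statement) =====
-- stated objective: faster
-- what changed: Replaces the recursion with repeated string slicing and pow(2, len-1) by a single left-to-right pass that accumulates the x/y offsets by doubling (bit shifting) and adds them once at the end.
import Mathlib
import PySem

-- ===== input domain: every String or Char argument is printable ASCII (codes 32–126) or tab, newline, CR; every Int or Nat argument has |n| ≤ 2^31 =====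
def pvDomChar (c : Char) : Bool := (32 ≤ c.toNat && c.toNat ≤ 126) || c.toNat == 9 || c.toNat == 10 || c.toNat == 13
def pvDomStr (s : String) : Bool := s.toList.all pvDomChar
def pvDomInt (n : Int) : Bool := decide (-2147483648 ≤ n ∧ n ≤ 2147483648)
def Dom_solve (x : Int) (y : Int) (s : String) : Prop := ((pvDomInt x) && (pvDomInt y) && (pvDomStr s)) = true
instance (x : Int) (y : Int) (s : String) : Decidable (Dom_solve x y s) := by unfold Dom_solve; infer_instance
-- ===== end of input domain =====

-- B replaces A's O(n^2) recursion (slicing + pow(2, len-1) each step) by one O(n) pass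
-- accumulating the x/y offsets by doubling; both are proved to return the same pair.

-- ===== PORT A =====
-- literal port of A's recursion on the string's characters (s[1:] = the tail)
def solveList (x : Int) (y : Int) : List Char → Int × Int
  | [] => (x, y)
  | c :: rest =>
    if c = '0' then solveList x y rest
    else if c = '1' then solveList (x + 2 ^ rest.length) y rest
    else if c = '2' then solveList x (y + 2 ^ rest.length) rest
    else solveList (x + 2 ^ rest.length) (y + 2 ^ rest.length) rest

def solve (x : Int) (y : Int) (s : String) : Int × Int := solveList x y s.toList

-- ===== PORT B =====
-- one step of Source B's loop body on the offset pair (dx, dy)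
def stepB (p : Int × Int) (c : Char) : Int × Int :=
  let dx := 2 * p.1
  let dy := 2 * p.2
  if c = '1' then (dx + 1, dy)
  else if c = '2' then (dx, dy + 1)
  else if c ≠ '0' then (dx + 1, dy + 1)
  else (dx, dy)

def solve_alt (x : Int) (y : Int) (s : String) : Int × Int :=
  let d := s.toList.foldl stepB (0, 0)
  (x + d.1, y + d.2)

-- ===== PRECONDITION & SPEC =====
def Spec_solve (x : Int) (y : Int) (s : String) (out : Int × Int) : Prop := out = solve_alt x y s
instance (x : Int) (y : Int) (s : String) (out : Int × Int) : Decidable (Spec_solve x y s out) := by unfold Spec_solve; infer_instance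

-- ===== CLAIM (what is proved, stated in full; the proofs are below) =====
def Claim_equal_solve : Prop := ∀ (x : Int) (y : Int) (s : String), Dom_solve x y s → Spec_solve x y s (solve x y s)

-- ===== LEMMAS AND PROOFS =====

theorem solveList_fold (l : List Char) : ∀ (x y : Int) (p : Int × Int),
    solveList (x + p.1 * 2 ^ l.length) (y + p.2 * 2 ^ l.length) l =
      (x + (l.foldl stepB p).1, y + (l.foldl stepB p).2) := by
  induction l with
  | nil => intro x y p; simp [solveList]
  | cons c rest ih =>
    intro x y p
    rw [List.foldl_cons]
    simp only [solveList, stepB, List.length_cons, pow_succ]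
    have e : ∀ q a : Int, a + q * (2 ^ rest.length * 2) = a + (2 * q) * 2 ^ rest.length := by
      intro q a; ring
    have e1 : ∀ q a : Int,
        a + q * (2 ^ rest.length * 2) + 2 ^ rest.length = a + (2 * q + 1) * 2 ^ rest.length := by
      intro q a; ring
    by_cases h0 : c = '0'
    · subst h0
      rw [if_pos (rfl : ('0' : Char) = '0'), if_neg (by decide : ¬ ('0' : Char) = '1'),
        if_neg (by decide : ¬ ('0' : Char) = '2'), if_neg (by decide : ¬ ('0' : Char) ≠ '0')]
      rw [e p.1, e p.2]; exact ih x y (2 * p.1, 2 * p.2)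
    · by_cases h1 : c = '1'
      · subst h1
        rw [if_neg (by decide : ¬ ('1' : Char) = '0'), if_pos (rfl : ('1' : Char) = '1'),
          if_pos (rfl : ('1' : Char) = '1')]
        rw [e1 p.1, e p.2]; exact ih x y (2 * p.1 + 1, 2 * p.2)
      · by_cases h2 : c = '2'
        · subst h2
          rw [if_neg (by decide : ¬ ('2' : Char) = '0'), if_neg (by decide : ¬ ('2' : Char) = '1'),
            if_neg (by decide : ¬ ('2' : Char) = '1'), if_pos (rfl : ('2' : Char) = '2'),
            if_pos (rfl : ('2' : Char) = '2')]
          rw [e p.1, e1 p.2]; exact ih x y (2 * p.1, 2 * p.2 + 1)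
        · rw [if_neg h0, if_neg h1, if_neg h1, if_neg h2, if_neg h2, if_pos h0]
          rw [e1 p.1, e1 p.2]; exact ih x y (2 * p.1 + 1, 2 * p.2 + 1)

theorem solve_spec : Claim_equal_solve := by
  intro x y s _
  unfold Spec_solve solve solve_alt
  have h := solveList_fold s.toList x y (0, 0)
  simpa using h

-- ===== VERDICT (by name: the statement is the Claim_ definition above) =====
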